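-- pv_equiv track=rewrite | github.com/chuanwise/deep-sparql | src/deep_sparql/utils.py | _count_open_and_closing_brackets
-- ===== SOURCE A (Python) =====
-- def _count_open_and_closing_brackets(query: str) -> tuple[int, int]:
--     current_quote = None
--     in_literal = False
--     open = close = 0
--     for c in query:
--         if c in ["'", '"'] and (current_quote is None or current_quote == c):
--             if in_literal:
--                 in_literal = False
--                 current_quote = None
--             else:
--                 in_literal = True
--                 current_quote = c
--         elif c == "{" and not in_literal:
--             open += 1
--         elif c == "}" and not in_literal:
--             close += 1
--     return open, close
-- ===== SOURCE B (Python) =====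
-- def _count_open_and_closing_brackets(query: str) -> tuple[int, int]:
--     # Build the text with quoted literals removed (skip-ahead via find),
--     # then count braces with two library calls.
--     cleaned = []
--     i = 0
--     n = len(query)
--     while i < n:
--         c = query[i]
--         if c == "'" or c == '"':
--             j = query.find(c, i + 1)
--             i = n if j == -1 else j + 1
--         else:
--             cleaned.append(c)
--             i += 1
--     s = ''.join(cleaned)
--     return s.count('{'), s.count('}')
-- ===== Notes on version B (the rewrite author's own statement) =====
-- stated objective: simpler
-- what changed: Replaced the per-character current_quote/in_literal state machine by a skip-ahead pass using str.find that strips quoted literals, then counts braces with two str.count library calls.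
import Mathlib
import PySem

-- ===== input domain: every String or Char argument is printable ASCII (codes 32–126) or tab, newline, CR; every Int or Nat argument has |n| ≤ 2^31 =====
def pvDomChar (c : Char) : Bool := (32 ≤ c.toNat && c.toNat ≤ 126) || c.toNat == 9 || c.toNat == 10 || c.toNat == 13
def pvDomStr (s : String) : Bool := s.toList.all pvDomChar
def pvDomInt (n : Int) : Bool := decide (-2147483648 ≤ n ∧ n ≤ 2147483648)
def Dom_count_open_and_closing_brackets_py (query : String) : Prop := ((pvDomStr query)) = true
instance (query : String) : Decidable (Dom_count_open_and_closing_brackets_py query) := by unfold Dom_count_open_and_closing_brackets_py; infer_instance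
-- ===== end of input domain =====

-- B replaces A's per-character quote state machine by stripping quoted literals
-- with a skip-ahead pass and then counting braces in the cleaned text (simpler).

-- ===== PORT A =====
-- state: ((current_quote, in_literal), (open, close))
def pvStepA (st : (Option Char × Bool) × Int × Int) (c : Char) : (Option Char × Bool) × Int × Int :=
  let cq := st.1.1
  let inlit := st.1.2
  let op := st.2.1
  let cl := st.2.2
  if (c = '\'' ∨ c = '"') ∧ (cq = none ∨ cq = some c) then
    if inlit then ((none, false), op, cl) else ((some c, true), op, cl)
  else if c = '{' ∧ inlit = false then ((cq, inlit), op + 1, cl)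
  else if c = '}' ∧ inlit = false then ((cq, inlit), op, cl + 1)
  else ((cq, inlit), op, cl)

def count_open_and_closing_brackets_py (query : String) : Int × Int :=
  (query.toList.foldl pvStepA ((none, false), 0, 0)).2

-- ===== PORT B =====
-- Source B's while loop over indices with query.find(c, i+1): on a quote it jumps
-- past the matching quote (or to the end); here the same jump is the dropWhile/drop.
def pvClean : List Char → List Char
  | [] => []
  | c :: rest =>
    if c = '\'' ∨ c = '"' then pvClean ((rest.dropWhile (· ≠ c)).drop 1)
    else c :: pvClean rest
termination_by l => l.length
decreasing_by
  all_goals simp only [List.length_drop, List.length_cons]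
  · have := List.length_dropWhile_le (p := (· ≠ c)) (l := rest); omega
  · omega

def count_open_and_closing_brackets_py_alt (query : String) : Int × Int :=
  let s := pvClean query.toList
  ((s.count '{' : Int), (s.count '}' : Int))

-- ===== PRECONDITION & SPEC =====
def Spec_count_open_and_closing_brackets_py (query : String) (out : Int × Int) : Prop := out = count_open_and_closing_brackets_py_alt query
instance (query : String) (out : Int × Int) : Decidable (Spec_count_open_and_closing_brackets_py query out) := by unfold Spec_count_open_and_closing_brackets_py; infer_instance

-- ===== CLAIM (what is proved, stated in full; the proofs are below) =====
def Claim_equal_count_open_and_closing_brackets_py : Prop := ∀ (query : String), Dom_count_open_and_closing_brackets_py query → Spec_count_open_and_closing_brackets_py query (count_open_and_closing_brackets_py query)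

-- ===== LEMMAS AND PROOFS =====

-- Inside a literal opened by quote q, A's fold ignores everything up to and
-- including the closing q; only the counts matter.
theorem pvFoldA_inlit (q : Char) (hq : q = '\'' ∨ q = '"') :
    ∀ (l : List Char) (op cl : Int),
      (l.foldl pvStepA ((some q, true), op, cl)).2
        = (((l.dropWhile (· ≠ q)).drop 1).foldl pvStepA ((none, false), op, cl)).2 := by
  intro l
  induction l with
  | nil => intro op cl; simp
  | cons a l ih =>
    intro op cl
    by_cases ha : a = q
    · subst ha
      simp [List.foldl_cons, pvStepA, hq]
    · have hstep : pvStepA ((some q, true), op, cl) a = ((some q, true), op, cl) := by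
        simp [pvStepA]
        intro h1 h2; exact absurd h2.symm ha
      rw [List.foldl_cons, hstep, List.dropWhile_cons,
        if_pos (show (decide (a ≠ q)) = true by simp [ha])]
      exact ih op cl

-- Main invariant: A's fold from the out-of-literal state adds exactly the brace
-- counts of the cleaned list.
theorem pvFoldA_main :
    ∀ (l : List Char) (op cl : Int),
      (l.foldl pvStepA ((none, false), op, cl)).2
        = (op + ((pvClean l).count '{' : Int), cl + ((pvClean l).count '}' : Int)) := by
  intro l
  induction l using pvClean.induct with
  | case1 => intro op cl; simp [pvClean]
  | case2 c rest hq ih =>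
    intro op cl
    have hstep : pvStepA ((none, false), op, cl) c = ((some c, true), op, cl) := by
      simp [pvStepA, hq]
    rw [List.foldl_cons, hstep, pvFoldA_inlit c hq, ih]
    rw [pvClean]
    simp [hq]
  | case3 c rest hq ih =>
    intro op cl
    rw [List.foldl_cons, pvClean, if_neg hq]
    by_cases h1 : c = '{'
    · subst h1
      have hstep : pvStepA ((none, false), op, cl) '{' = ((none, false), op + 1, cl) := by
        simp [pvStepA]
      rw [hstep, ih]
      simp only [List.count_cons, Prod.mk.injEq]
      constructor <;> simp <;> omega
    · by_cases h2 : c = '}'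
      · subst h2
        have hstep : pvStepA ((none, false), op, cl) '}' = ((none, false), op, cl + 1) := by
          simp [pvStepA]
        rw [hstep, ih]
        simp only [List.count_cons, Prod.mk.injEq]
        constructor <;> simp <;> omega
      · have hstep : pvStepA ((none, false), op, cl) c = ((none, false), op, cl) := by
          simp [pvStepA, hq, h1, h2]
        rw [hstep, ih]
        simp [h1, h2]

-- ===== VERDICT (by name: the statement is the Claim_ definition above) =====
theorem count_open_and_closing_brackets_py_spec : Claim_equal_count_open_and_closing_brackets_py := by
  intro query _
  unfold Spec_count_open_and_closing_brackets_py count_open_and_closing_brackets_py count_open_and_closing_brackets_py_alt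
  rw [pvFoldA_main]
  simp
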